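-- pv_equiv track=rewrite | github.com/nijox7/TP1 | print_ppm.py | format_P3
-- ===== SOURCE A (Python) =====
-- def format_P3(fichier,l,i):
--     P3 = ""
--     interrupteur = False
--     texte = fichier[l]
--
--     for j in range(i,len(texte)):
--         c=texte[j]
--         if interrupteur == True:
--             if c == " " or i == len(texte)-1:
--                 return P3,l,i
--             else:
--                 P3 += c
--         elif c == "#" or j == len(texte)-1:
--             return format_P3(fichier,l+1,0)
--         else:
--             P3 += c
--             interrupteur = True
-- ===== SOURCE B (Python) =====
-- def format_P3(fichier, l, i):
--     # Iterative re-implementation: explicit line loop instead of tail recursion,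
--     # direct "find first space after i" scan + slice instead of the char-accumulator/switch.
--     while True:
--         texte = fichier[l]
--         n = len(texte)
--         if i < n and (texte[i] == "#" or i == n - 1):
--             l += 1
--             i = 0
--             continue
--         for j in range(i + 1, n):
--             if texte[j] == " ":
--                 return texte[i:j], l, i
--         return None
-- ===== Notes on version B (the rewrite author's own statement) =====
-- stated objective: simpler
-- what changed: Replaces A's tail recursion and its accumulator/switch character loop by an explicit while-loop over lines plus a direct first-space scan that returns a slice texte[i:j].
-- outside the precondition, e.g. on format_P3(['ab c'], 0, -2): A returns (' cab', 0, -2), B returns ('', 0, -2)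
import Mathlib
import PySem

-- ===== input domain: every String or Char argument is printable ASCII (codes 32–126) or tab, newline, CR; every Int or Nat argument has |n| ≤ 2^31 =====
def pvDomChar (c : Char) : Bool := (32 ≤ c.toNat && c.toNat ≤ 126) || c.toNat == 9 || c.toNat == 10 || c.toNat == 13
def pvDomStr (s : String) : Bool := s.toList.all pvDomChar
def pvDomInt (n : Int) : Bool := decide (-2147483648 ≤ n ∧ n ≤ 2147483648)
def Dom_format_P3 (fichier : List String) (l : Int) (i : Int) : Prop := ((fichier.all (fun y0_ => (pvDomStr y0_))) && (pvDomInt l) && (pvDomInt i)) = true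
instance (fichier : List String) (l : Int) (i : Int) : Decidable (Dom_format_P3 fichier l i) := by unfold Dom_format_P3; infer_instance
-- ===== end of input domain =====

-- B replaces A's tail recursion and accumulator/switch character loop by an explicit
-- while-loop over lines plus a direct first-space scan returning a slice (objective: simpler).

-- a successful fichier[l] lookup bounds l (used by both ports' decreasing_by)
lemma pvGetSome_lt {xs : List String} {l : Int} {t : String}
    (h : PySem.List.pyGet? xs l = some t) : -(xs.length : Int) ≤ l ∧ l < (xs.length : Int) := by
  by_contra hc
  have : PySem.List.pyGet? xs l = none :=
    (PySem.List.pyGet?_eq_none_iff xs l).mpr (by simpa [PySem.Raise.InRange] using hc)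
  simp [this] at h

-- ===== PORT A =====
-- the 'for j in range(i, len(texte))' body; result: some r = 'return r', none = 'return format_P3(fichier, l+1, 0)';
-- falling off the end of the loop is 'some none' (Python's implicit None); an IndexError (only reachable
-- outside Pre_, i < -len(texte)) is rendered as 'some none' too.
def pvLoopA (cs : List Char) (n l i : Int) (js : List Int) (P3 : List Char) (sw : Bool) :
    Option (Option (String × Int × Int)) :=
  match js with
  | [] => some none
  | j :: js =>
    match PySem.List.pyGet? cs j with
    | none => some none
    | some c =>
      if sw then
        if c = ' ' ∨ i = n - 1 then some (some (String.ofList P3, l, i))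
        else pvLoopA cs n l i js (P3 ++ [c]) sw
      else if c = '#' ∨ j = n - 1 then none
      else pvLoopA cs n l i js (P3 ++ [c]) true

def format_P3 (fichier : List String) (l : Int) (i : Int) : Option (String × Int × Int) :=
  match hA : PySem.List.pyGet? fichier l with
  | none => none    -- fichier[l] raises IndexError: outside Pre_
  | some texte =>
    let cs := texte.toList
    let n : Int := cs.length
    match pvLoopA cs n l i (PySem.List.pyRange i n) [] false with
    | some r => r
    | none => format_P3 fichier (l + 1) 0
termination_by (fichier.length - l).toNat
decreasing_by
  have h := pvGetSome_lt hA
  omega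

-- ===== PORT B =====
-- 'for j in range(i+1, n): if texte[j] == " ": return …' — first index carrying a space
-- (none also on an IndexError, only reachable outside Pre_).
def pvFindSpace (cs : List Char) (js : List Int) : Option Int :=
  match js with
  | [] => none
  | j :: js =>
    match PySem.List.pyGet? cs j with
    | none => none
    | some c => if c = ' ' then some j else pvFindSpace cs js

def format_P3_alt (fichier : List String) (l : Int) (i : Int) : Option (String × Int × Int) :=
  match hB : PySem.List.pyGet? fichier l with
  | none => none    -- fichier[l] raises IndexError: outside Pre_
  | some texte =>
    let cs := texte.toList
    let n : Int := cs.length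
    if i < n ∧ (PySem.List.pyGet? cs i = some '#' ∨ i = n - 1) then
      format_P3_alt fichier (l + 1) 0
    else
      match pvFindSpace cs (PySem.List.pyRange (i + 1) n) with
      | some j => some (String.ofList (PySem.List.slice cs (some i) (some j)), l, i)
      | none => none
termination_by (fichier.length - l).toNat
decreasing_by
  have h := pvGetSome_lt hB
  omega

-- ===== PRECONDITION & SPEC =====
-- does line cs, scanned from index i, hand over to the next line (recurse / 'continue')?
def pvTrigger (cs : List Char) (i : Int) : Bool :=
  decide (i < (cs.length : Int)) &&
    (PySem.List.pyGet? cs i == some '#' || decide (i = (cs.length : Int) - 1))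
-- a line the comment-skipping chain (restarting at index 0) skips over
def pvSkip (s : String) : Bool := pvTrigger s.toList 0

-- Pre_ excludes (a) inputs where A raises IndexError: fichier[l] out of range, or the
-- comment-skipping chain runs past the last line; and (b) negative i, a corner no caller would
-- specify, where both results hinge on Python's negative-index wraparound and A's wrapped
-- character-by-character scan and B's slice return different accidental values.
def Pre_format_P3 (fichier : List String) (l : Int) (i : Int) : Prop :=
  0 ≤ i ∧ (PySem.List.pyGet? fichier l).isSome = true ∧
  (pvTrigger ((PySem.List.pyGet? fichier l).getD "").toList i = true →
    ∃ l' ∈ PySem.List.pyRange (l + 1) fichier.length,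
      pvSkip ((PySem.List.pyGet? fichier l').getD "") = false)
instance (fichier : List String) (l : Int) (i : Int) : Decidable (Pre_format_P3 fichier l i) := by
  unfold Pre_format_P3; infer_instance

def pvWitness_format_P3 : List String × Int × Int := (["#sz", "255 17"], 0, 0)

def Spec_format_P3 (fichier : List String) (l : Int) (i : Int) (out : Option (String × Int × Int)) : Prop := out = format_P3_alt fichier l i
instance (fichier : List String) (l : Int) (i : Int) (out : Option (String × Int × Int)) : Decidable (Spec_format_P3 fichier l i out) := by unfold Spec_format_P3; infer_instance

-- ===== CLAIM (what is proved, stated in full; the proofs are below) =====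
def Claim_equal_format_P3 : Prop := ∀ (fichier : List String) (l : Int) (i : Int), Dom_format_P3 fichier l i → Pre_format_P3 fichier l i → Spec_format_P3 fichier l i (format_P3 fichier l i)

-- ===== LEMMAS AND PROOFS =====

lemma pvFindSpace_mem (cs : List Char) (js : List Int) (j : Int)
    (h : pvFindSpace cs js = some j) : j ∈ js := by
  induction js with
  | nil => simp [pvFindSpace] at h
  | cons a js ih =>
    unfold pvFindSpace at h
    rcases hg : PySem.List.pyGet? cs a with _ | c <;> rw [hg] at h
    · simp at h
    · by_cases hc : c = ' '
      · simp [hc] at h; simp [h]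
      · simp [hc] at h; exact List.mem_cons_of_mem _ (ih h)

-- a slice extended one character to the left
lemma pvSlice_cons (cs : List Char) (a j : Int) (ha : 0 ≤ a) (hal : a < (cs.length : Int))
    (haj : a < j) (c : Char) (hc : PySem.List.pyGet? cs a = some c) :
    PySem.List.slice cs (some a) (some j) = c :: PySem.List.slice cs (some (a + 1)) (some j) := by
  have h0j : (0:Int) ≤ j := by omega
  have hlt : a.toNat < cs.length := by omega
  have hc' : c = cs[a.toNat] := by
    rw [PySem.List.pyGet?_eq_some_getElem cs ha hal] at hc
    exact (Option.some_injective _ hc).symm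
  rw [PySem.List.slice_toNat cs ha h0j, PySem.List.slice_toNat cs (by omega) h0j]
  rw [show (a + 1).toNat = a.toNat + 1 from by omega]
  rw [List.drop_eq_getElem_cons hlt]
  rw [show j.toNat - a.toNat = (j.toNat - (a.toNat + 1)) + 1 from by omega]
  rw [List.take_succ_cons, hc']

-- the scan loop with the switch on, started at a > i ≥ 0 (so i ≠ n-1 makes the 'i == n-1' test dead),
-- is B's first-space search plus a slice
lemma pvLoopA_scan (cs : List Char) (l i : Int) (hi : ¬ i = (cs.length : Int) - 1) :
    ∀ (a : Int) (P3 : List Char), 0 < a →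
    pvLoopA cs (cs.length : Int) l i (PySem.List.pyRange a (cs.length : Int)) P3 true =
      some (match pvFindSpace cs (PySem.List.pyRange a (cs.length : Int)) with
            | some j => some (String.ofList (P3 ++ PySem.List.slice cs (some a) (some j)), l, i)
            | none => none) := by
  intro a P3 ha
  by_cases h : (cs.length : Int) ≤ a
  · rw [PySem.List.pyRange_one_eq_nil h]; simp [pvLoopA, pvFindSpace]
  · have hal : a < (cs.length : Int) := by omega
    rw [PySem.List.pyRange_one_cons hal]
    obtain ⟨c, hc⟩ : ∃ c, PySem.List.pyGet? cs a = some c := by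
      rw [PySem.List.pyGet?_eq_some_getElem cs (by omega) hal]; exact ⟨_, rfl⟩
    by_cases hsp : c = ' '
    · have hsl : PySem.List.slice cs (some a) (some a) = [] := by
        rw [PySem.List.slice_toNat cs (by omega) (by omega)]; simp
      simp [pvLoopA, pvFindSpace, hc, hsp, hsl]
    · have hcond : ¬ (c = ' ' ∨ i = (cs.length : Int) - 1) := by tauto
      have hstep : pvLoopA cs (cs.length : Int) l i
          (a :: PySem.List.pyRange (a + 1) (cs.length : Int)) P3 true =
          pvLoopA cs (cs.length : Int) l i (PySem.List.pyRange (a + 1) (cs.length : Int))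
            (P3 ++ [c]) true := by
        simp [pvLoopA, hc, hcond]
      rw [hstep, pvLoopA_scan cs l i hi (a + 1) (P3 ++ [c]) (by omega)]
      rcases hf : pvFindSpace cs (PySem.List.pyRange (a + 1) (cs.length : Int)) with _ | j
      · simp [pvFindSpace, hc, hsp, hf]
      · have hj : a + 1 ≤ j := (PySem.List.mem_pyRange_one.mp (pvFindSpace_mem _ _ _ hf)).1
        have hsl := pvSlice_cons cs a j (by omega) hal (by omega) c hc
        simp [pvFindSpace, hc, hsp, hf, hsl]
termination_by a => ((cs.length : Int) - a).toNat
decreasing_by omega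

-- one unfolding step of each port, with fichier[l] = texte known
lemma format_P3_eq (fichier : List String) (l i : Int) (texte : String)
    (h : PySem.List.pyGet? fichier l = some texte) :
    format_P3 fichier l i =
      (match pvLoopA texte.toList (texte.toList.length : Int) l i
          (PySem.List.pyRange i (texte.toList.length : Int)) [] false with
       | some r => r
       | none => format_P3 fichier (l + 1) 0) := by
  rw [format_P3]; split <;> rename_i heq <;> rw [heq] at h
  · exact absurd h (by simp)
  · cases h; rfl

lemma format_P3_alt_eq (fichier : List String) (l i : Int) (texte : String)
    (h : PySem.List.pyGet? fichier l = some texte) :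
    format_P3_alt fichier l i =
      (if i < (texte.toList.length : Int) ∧
          (PySem.List.pyGet? texte.toList i = some '#' ∨ i = (texte.toList.length : Int) - 1) then
        format_P3_alt fichier (l + 1) 0
      else
        match pvFindSpace texte.toList (PySem.List.pyRange (i + 1) (texte.toList.length : Int)) with
        | some j => some (String.ofList (PySem.List.slice texte.toList (some i) (some j)), l, i)
        | none => none) := by
  rw [format_P3_alt]; split <;> rename_i heq <;> rw [heq] at h
  · exact absurd h (by simp)
  · cases h; rfl

lemma pv_main (fichier : List String) : ∀ (k : Nat) (l i : Int),
    (fichier.length - l).toNat ≤ k → Pre_format_P3 fichier l i →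
    format_P3 fichier l i = format_P3_alt fichier l i := by
  intro k
  induction k with
  | zero =>
    intro l i hk hpre
    obtain ⟨_, hs, _⟩ := hpre
    rcases h : PySem.List.pyGet? fichier l with _ | texte
    · rw [h] at hs; simp at hs
    · have := pvGetSome_lt h
      omega
  | succ k ih =>
    intro l i hk hpre
    obtain ⟨hi0, hs, hchain⟩ := hpre
    rcases h : PySem.List.pyGet? fichier l with _ | texte
    · rw [h] at hs; simp at hs
    have hlb := pvGetSome_lt h
    rw [format_P3_eq fichier l i texte h, format_P3_alt_eq fichier l i texte h]
    rw [h] at hchain; simp only [Option.getD_some] at hchain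
    set cs := texte.toList with hcs
    by_cases htr : i < (cs.length : Int) ∧
        (PySem.List.pyGet? cs i = some '#' ∨ i = (cs.length : Int) - 1)
    · -- trigger: both hand over to line l+1
      obtain ⟨l', hl'mem, hl'skip⟩ := hchain (by
        unfold pvTrigger
        rcases htr with ⟨h1, h2⟩
        simp only [Bool.and_eq_true, Bool.or_eq_true, decide_eq_true_eq, beq_iff_eq]
        exact ⟨h1, by tauto⟩)
      obtain ⟨hl'lo, hl'hi⟩ := PySem.List.mem_pyRange_one.mp hl'mem
      obtain ⟨c, hc⟩ : ∃ c, PySem.List.pyGet? cs i = some c := by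
        rw [PySem.List.pyGet?_eq_some_getElem cs hi0 htr.1]; exact ⟨_, rfl⟩
      have hcset : c = '#' ∨ i = (cs.length : Int) - 1 := by
        rcases htr.2 with h2 | h2
        · left; exact Option.some_injective _ (hc.symm.trans h2)
        · right; exact h2
      have hA : pvLoopA cs (cs.length : Int) l i (PySem.List.pyRange i (cs.length : Int)) [] false
          = none := by
        rw [PySem.List.pyRange_one_cons htr.1]
        simp [pvLoopA, hc, hcset]
      rw [if_pos htr, hA]
      -- the recursive calls agree, by the induction hypothesis
      apply ih (l + 1) 0 (by omega)
      refine ⟨le_refl 0, ?_, ?_⟩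
      · refine Option.isSome_iff_ne_none.mpr (fun hno => ?_)
        exact (PySem.List.pyGet?_eq_none_iff fichier (l + 1)).mp hno ⟨by omega, by omega⟩
      · intro htr1
        refine ⟨l', PySem.List.mem_pyRange_one.mpr ⟨?_, hl'hi⟩, hl'skip⟩
        rcases eq_or_lt_of_le hl'lo with heq | hlt
        · exfalso
          have hskipt : pvSkip ((PySem.List.pyGet? fichier l').getD "") = true := by
            rw [← heq]; exact htr1
          rw [hl'skip] at hskipt; exact absurd hskipt (by simp)
        · omega
    · -- no trigger: neither recurses; the scan equals first-space + slice
      rw [if_neg htr]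
      by_cases hin : i < (cs.length : Int)
      · have hnt : i ≠ (cs.length : Int) - 1 := by intro he; exact htr ⟨hin, Or.inr he⟩
        obtain ⟨c, hc⟩ : ∃ c, PySem.List.pyGet? cs i = some c := by
          rw [PySem.List.pyGet?_eq_some_getElem cs hi0 hin]; exact ⟨_, rfl⟩
        have hch : ¬ (c = '#' ∨ i = (cs.length : Int) - 1) := by
          rintro (h1 | h1)
          · exact htr ⟨hin, Or.inl (by rw [hc, h1])⟩
          · exact hnt h1
        have hstep : pvLoopA cs (cs.length : Int) l i
            (PySem.List.pyRange i (cs.length : Int)) [] false =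
            pvLoopA cs (cs.length : Int) l i (PySem.List.pyRange (i + 1) (cs.length : Int))
              [c] true := by
          rw [PySem.List.pyRange_one_cons hin]; simp [pvLoopA, hc, hch]
        rw [hstep, pvLoopA_scan cs l i hnt (i + 1) [c] (by omega)]
        rcases hf : pvFindSpace cs (PySem.List.pyRange (i + 1) (cs.length : Int)) with _ | j
        · simp
        · have hj : i + 1 ≤ j := (PySem.List.mem_pyRange_one.mp (pvFindSpace_mem _ _ _ hf)).1
          have hsl := pvSlice_cons cs i j hi0 hin (by omega) c hc
          simp [hsl]
      · -- i past the end of the line: A's range is empty, B finds no space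
        rw [PySem.List.pyRange_one_eq_nil (by omega), PySem.List.pyRange_one_eq_nil (by omega)]
        simp [pvLoopA, pvFindSpace]

-- ===== VERDICT (by name: the statement is the Claim_ definition above) =====
theorem format_P3_spec : Claim_equal_format_P3 := by
  intro fichier l i _ hpre
  unfold Spec_format_P3
  exact pv_main fichier (fichier.length - l).toNat l i (le_refl _) hpre
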